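-- pv_equiv track=rewrite | github.com/MamoruKomo/market-morning-brief | pipelines/tdnet/alert.py | split_company_and_subject
-- ===== SOURCE A (Python) =====
-- def normalize_spaces(text: str) -> str:
--     return " ".join(str(text or "").split()).strip()
--
-- TITLE_BOUNDARY_TOKENS = (
--     "[delayed]",
--     "（Correction）",
--     "(Correction)",
--     " Notice ",
--     " Notice",
--     " Announcement ",
--     " Announcement",
--     " Financial Results",
--     " Earnings",
-- )
--
-- def split_company_and_subject(title: str) -> tuple[str, str]:
--     s = normalize_spaces(title)
--     if not s:
--         return "", ""
--     lower = s.lower()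
--
--     boundary: int | None = None
--     for token in TITLE_BOUNDARY_TOKENS:
--         idx = lower.find(token.lower())
--         if idx == -1:
--             continue
--         if boundary is None or idx < boundary:
--             boundary = idx
--
--     if boundary is None:
--         return "", s
--
--     company = s[:boundary].strip(" -–—()（）")
--     subject = s[boundary:].lstrip()
--     return company, subject
-- ===== SOURCE B (Python) =====
-- def normalize_spaces(text: str) -> str:
--     return " ".join(str(text or "").split()).strip()
--
-- TITLE_BOUNDARY_TOKENS = (
--     "[delayed]",
--     "（Correction）",
--     "(Correction)",
--     " Notice ",
--     " Notice",
--     " Announcement ",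
--     " Announcement",
--     " Financial Results",
--     " Earnings",
-- )
--
-- _TOKENS_LOWER = tuple(t.lower() for t in TITLE_BOUNDARY_TOKENS)
--
-- def split_company_and_subject(title: str) -> tuple[str, str]:
--     # Single left-to-right scan: the first position where any boundary token
--     # starts is the minimum of the per-token first occurrences.
--     s = normalize_spaces(title)
--     if not s:
--         return "", ""
--     lower = s.lower()
--     for i in range(len(lower)):
--         if any(lower.startswith(tok, i) for tok in _TOKENS_LOWER):
--             return s[:i].strip(" -–—()（）"), s[i:].lstrip()
--     return "", s
-- ===== Notes on version B (the rewrite author's own statement) =====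
-- stated objective: alternative
-- what changed: A finds each boundary token separately with str.find and tracks the minimum index across the token loop; B does one left-to-right scan over the lowered string and stops at the first position where any boundary token starts.
import Mathlib
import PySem

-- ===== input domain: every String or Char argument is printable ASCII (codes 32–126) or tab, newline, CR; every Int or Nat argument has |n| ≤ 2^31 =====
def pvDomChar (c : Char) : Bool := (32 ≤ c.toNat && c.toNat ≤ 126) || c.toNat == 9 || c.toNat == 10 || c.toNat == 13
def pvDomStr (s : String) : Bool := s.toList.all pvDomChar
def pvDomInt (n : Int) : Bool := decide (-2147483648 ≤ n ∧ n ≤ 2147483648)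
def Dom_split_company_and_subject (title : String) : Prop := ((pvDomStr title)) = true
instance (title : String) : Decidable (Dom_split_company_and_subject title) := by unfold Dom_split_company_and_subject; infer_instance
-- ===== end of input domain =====

-- B replaces A's per-token find+minimum bookkeeping by a single left-to-right scan for the
-- first position where any boundary token starts (objective: alternative algorithm, same result).

-- ===== PORT A =====
-- normalize_spaces(text) = " ".join(str(text or "").split()).strip(); 'str(text or "")' is the
-- identity on str arguments (empty string stays empty), so it is not re-modelled.
def pvNormalizeSpaces (text : List Char) : List Char :=
  PySem.Chars.strip (PySem.Chars.join [' '] (PySem.Chars.split₀ text))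

def pvTokens : List (List Char) :=
  ["[delayed]".toList, "（Correction）".toList, "(Correction)".toList, " Notice ".toList,
   " Notice".toList, " Announcement ".toList, " Announcement".toList,
   " Financial Results".toList, " Earnings".toList]

def pvStripSet : List Char := " -–—()（）".toList

-- loop body of A: fold the running minimum boundary over the tokens (tok already lowered at call site)
def pvStep (lower : List Char) (b : Option Int) (tok : List Char) : Option Int :=
  let idx := PySem.Chars.find lower tok
  if idx = -1 then b
  else
    match b with
    | none => some idx
    | some bb => if idx < bb then some idx else some bb

def split_company_and_subject (title : String) : String × String :=
  let s := pvNormalizeSpaces title.toList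
  if s = [] then ("", "")
  else
    let lower := PySem.Chars.lower s
    let boundary : Option Int :=
      pvTokens.foldl (fun b tok => pvStep lower b (PySem.Chars.lower tok)) none
    match boundary with
    | none => ("", String.ofList s)
    | some b =>
        (String.ofList (PySem.Chars.stripChars (PySem.Chars.slice s none (some b)) pvStripSet),
         String.ofList (PySem.Chars.lstrip (PySem.Chars.slice s (some b) none)))

-- ===== PORT B =====
-- _TOKENS_LOWER = tuple(t.lower() for t in TITLE_BOUNDARY_TOKENS)
def pvTokensLower : List (List Char) := pvTokens.map PySem.Chars.lower

-- 'for i in range(len(lower)): if any(lower.startswith(tok, i) …)' = first index satisfying the test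
def split_company_and_subject_alt (title : String) : String × String :=
  let s := pvNormalizeSpaces title.toList
  if s = [] then ("", "")
  else
    let lower := PySem.Chars.lower s
    match (List.range lower.length).find?
        (fun i => pvTokensLower.any (fun tok => PySem.Chars.startswith (lower.drop i) tok)) with
    | none => ("", String.ofList s)
    | some i =>
        (String.ofList (PySem.Chars.stripChars (PySem.Chars.slice s none (some (i : Int))) pvStripSet),
         String.ofList (PySem.Chars.lstrip (PySem.Chars.slice s (some (i : Int)) none)))

-- ===== PRECONDITION & SPEC =====
def Spec_split_company_and_subject (title : String) (out : String × String) : Prop := out = split_company_and_subject_alt title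
instance (title : String) (out : String × String) : Decidable (Spec_split_company_and_subject title out) := by unfold Spec_split_company_and_subject; infer_instance

-- ===== CLAIM (what is proved, stated in full; the proofs are below) =====
def Claim_equal_split_company_and_subject : Prop := ∀ (title : String), Dom_split_company_and_subject title → Spec_split_company_and_subject title (split_company_and_subject title)

-- ===== LEMMAS AND PROOFS =====

-- the first occurrence of one token, as an Option
def pvFOpt (lower tok : List Char) : Option Int :=
  let idx := PySem.Chars.find lower tok
  if idx = -1 then none else some idx

-- minimum of two optional boundaries (ties keep the left/old one, as A does)
def pvOmin : Option Int → Option Int → Option Int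
  | none, b => b
  | some a, none => some a
  | some a, some b => some (if b < a then b else a)

lemma pvStep_eq (lower b tok) : pvStep lower b tok = pvOmin b (pvFOpt lower tok) := by
  cases b <;> simp only [pvStep, pvFOpt, pvOmin] <;> split_ifs <;> simp <;> omega

lemma pvOmin_assoc (a b c : Option Int) : pvOmin (pvOmin a b) c = pvOmin a (pvOmin b c) := by
  cases a <;> cases b <;> cases c <;> simp [pvOmin] <;> split_ifs <;> (first | rfl | omega)

lemma pvFoldl_omin (lower : List Char) (L : List (List Char)) (acc : Option Int) :
    L.foldl (fun b t => pvStep lower b t) acc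
      = pvOmin acc (L.foldl (fun b t => pvStep lower b t) none) := by
  induction L generalizing acc with
  | nil => cases acc <;> simp [pvOmin]
  | cons t L ih =>
      simp only [List.foldl_cons]
      rw [ih (pvStep lower acc t), ih (pvStep lower none t)]
      rw [pvStep_eq, pvStep_eq, pvOmin_assoc]
      rfl

lemma pvFind?_range_eq_some (n m : Nat) (p : Nat → Bool) (hp : p m = true)
    (hmin : ∀ j < m, ¬ p j = true) : m < n → (List.range n).find? p = some m := by
  induction n with
  | zero => omega
  | succ n ih =>
      intro hm
      rw [List.range_succ, List.find?_append]
      rcases Nat.lt_or_ge m n with h | h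
      · rw [ih h]; rfl
      · have hm' : m = n := by omega
        have hnone : (List.range n).find? p = none := by
          rw [List.find?_eq_none]
          intro x hx
          exact hmin x (by have := List.mem_range.mp hx; omega)
        rw [hnone, ← hm']
        simp [hp]

-- the single-token first occurrence is the first scan position where the token starts
lemma pvSingle (lower tok : List Char) (h : tok ≠ []) :
    pvFOpt lower tok
      = ((List.range lower.length).find? (fun i => PySem.Chars.startswith (lower.drop i) tok)).map
          (fun n => (n : Int)) := by
  by_cases hf : PySem.Chars.find lower tok = -1
  · have hinf : ¬ tok <:+: lower := (PySem.Chars.find_eq_neg_one_iff lower tok).mp hf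
    have : (List.range lower.length).find?
        (fun i => PySem.Chars.startswith (lower.drop i) tok) = none := by
      rw [List.find?_eq_none]
      intro i _
      intro hsw
      exact hinf (((PySem.Chars.startswith_iff _ _).mp hsw).isInfix.trans
        (List.drop_suffix i lower).isInfix)
    simp [pvFOpt, hf, this]
  · have h0 : 0 ≤ PySem.Chars.find lower tok := by
      have := PySem.Chars.neg_one_le_find lower tok
      omega
    obtain ⟨hpre, hminp⟩ := PySem.Chars.find_spec (s := lower) (sub := tok) h0
    set m := (PySem.Chars.find lower tok).toNat with hmdef
    have hmn : m < lower.length := by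
      by_contra hge
      have : lower.drop m = [] := List.drop_eq_nil_of_le (by omega)
      rw [this] at hpre
      exact h (List.prefix_nil.mp hpre)
    have hfind : (List.range lower.length).find?
        (fun i => PySem.Chars.startswith (lower.drop i) tok) = some m := by
      refine pvFind?_range_eq_some _ _ _ ?_ ?_ hmn
      · exact (PySem.Chars.startswith_iff _ _).mpr hpre
      · intro j hj hsw
        exact hminp j hj ((PySem.Chars.startswith_iff _ _).mp hsw)
    rw [hfind]
    simp [pvFOpt, hf]
    omega
  
-- minimum of two first-hits over a strictly increasing list is the first hit of the disjunction
lemma pvOmin_find? (l : List Nat) (hl : l.Pairwise (· < ·)) (p q : Nat → Bool) :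
    pvOmin ((l.find? p).map (fun n => (n : Int))) ((l.find? q).map (fun n => (n : Int)))
      = (l.find? (fun i => p i || q i)).map (fun n => (n : Int)) := by
  induction l with
  | nil => simp [pvOmin]
  | cons x l ih =>
      obtain ⟨hx, hl'⟩ := List.pairwise_cons.mp hl
      by_cases hp : p x = true <;> by_cases hq : q x = true
      · simp [hp, hq, pvOmin]
      · rw [List.find?_cons_of_pos hp, List.find?_cons_of_neg (by simp [hq]),
          List.find?_cons_of_pos (by simp [hp])]
        cases hfq : l.find? q with
        | none => simp [pvOmin]
        | some y =>
            have hy : x < y := hx y (List.mem_of_find?_eq_some hfq)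
            simp [pvOmin]
            omega
      · rw [List.find?_cons_of_neg (by simp [hp]), List.find?_cons_of_pos hq,
          List.find?_cons_of_pos (by simp [hp, hq])]
        cases hfp : l.find? p with
        | none => simp [pvOmin]
        | some y =>
            have hy : x < y := hx y (List.mem_of_find?_eq_some hfp)
            simp [pvOmin]
            omega
      · rw [List.find?_cons_of_neg (by simp [hp]), List.find?_cons_of_neg (by simp [hq]),
          List.find?_cons_of_neg (by simp [hp, hq])]
        exact ih hl'

-- A's whole token loop equals B's scan for the first matching position
lemma pvMain (lower : List Char) (L : List (List Char)) (h : ∀ t ∈ L, t ≠ []) :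
    L.foldl (fun b t => pvStep lower b t) none
      = ((List.range lower.length).find?
          (fun i => L.any (fun tok => PySem.Chars.startswith (lower.drop i) tok))).map
          (fun n => (n : Int)) := by
  induction L with
  | nil =>
      simp only [List.foldl_nil, List.any_nil]
      rw [List.find?_eq_none.mpr (fun x _ => by simp)]
      rfl
  | cons t L ih =>
      simp only [List.foldl_cons]
      rw [pvFoldl_omin, pvStep_eq]
      have hnone : pvOmin none (pvFOpt lower t) = pvFOpt lower t := rfl
      rw [hnone, ih (fun x hx => h x (List.mem_cons_of_mem t hx)),
        pvSingle lower t (h t (List.mem_cons_self ..)),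
        pvOmin_find? _ (List.pairwise_lt_range) ]
      congr 1

theorem pv_ports_agree (title : String) :
    split_company_and_subject title = split_company_and_subject_alt title := by
  unfold split_company_and_subject split_company_and_subject_alt
  set s := pvNormalizeSpaces title.toList with hs
  by_cases h : s = []
  · simp [h]
  · simp only [if_neg h]
    have htok : ∀ t ∈ pvTokens.map PySem.Chars.lower, t ≠ [] := by decide
    have hfold := pvMain (PySem.Chars.lower s) (pvTokens.map PySem.Chars.lower) htok
    rw [List.foldl_map] at hfold
    have hany : ∀ i : Nat,
        pvTokensLower.any (fun tok => PySem.Chars.startswith ((PySem.Chars.lower s).drop i) tok)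
          = (pvTokens.map PySem.Chars.lower).any
              (fun tok => PySem.Chars.startswith ((PySem.Chars.lower s).drop i) tok) := by
      intro i; rfl
    simp only [hany]
    rw [hfold]
    cases hF : (List.range (PySem.Chars.lower s).length).find?
        (fun i => (pvTokens.map PySem.Chars.lower).any
          (fun tok => PySem.Chars.startswith ((PySem.Chars.lower s).drop i) tok)) with
    | none => simp
    | some i => simp

-- ===== VERDICT (by name: the statement is the Claim_ definition above) =====
theorem split_company_and_subject_spec : Claim_equal_split_company_and_subject := by
  intro title _
  exact pv_ports_agree title
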